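-- pv_equiv track=rewrite | github.com/michael-borck/ISYS2001-Introduction-to-Business-Programming | _scripts/add_presenter_notes copy.py | parse_slides
-- ===== SOURCE A (Python) =====
-- def parse_slides(content):
--     slides = []
--     current_slide = ""
--     in_code_block = False
--     in_notes = False
--
--     for line in content.split('\n'):
--         if line.strip() == "```python":
--             in_code_block = True
--             current_slide += line + '\n'
--         elif line.strip() == "```":
--             in_code_block = False
--             current_slide += line + '\n'
--         elif line.strip() == "::: {.notes}":
--             in_notes = True
--             current_slide += line + '\n'
--         elif line.strip() == ":::" and in_notes:
--             in_notes = False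
--             current_slide += line + '\n'
--         elif line.startswith('# ') and not in_code_block and not in_notes:
--             if current_slide:
--                 slides.append(current_slide.strip())
--             current_slide = line + '\n'
--         else:
--             current_slide += line + '\n'
--
--     if current_slide:
--         slides.append(current_slide.strip())
--
--     return slides
-- ===== SOURCE B (Python) =====
-- def parse_slides(content):
--     lines = content.split('\n')
--     # pass 1: tag every line with whether it starts a new slide
--     marked = []
--     in_code = False
--     in_notes = False
--     for line in lines:
--         s = line.strip()
--         if s == "```python":
--             in_code = True
--             brk = False
--         elif s == "```":
--             in_code = False
--             brk = False
--         elif s == "::: {.notes}":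
--             in_notes = True
--             brk = False
--         elif s == ":::" and in_notes:
--             in_notes = False
--             brk = False
--         else:
--             brk = line.startswith('# ') and not in_code and not in_notes
--         marked.append((line, brk))
--     # pass 2: group lines into segments, cutting before each tagged line
--     segments = [[]]
--     for line, brk in marked:
--         if brk:
--             segments.append([line])
--         else:
--             segments[-1].append(line)
--     # pass 3: render non-empty segments
--     return ['\n'.join(seg).strip() for seg in segments if seg]
-- ===== Notes on version B (the rewrite author's own statement) =====
-- stated objective: alternative
-- what changed: A builds each slide as one growing string inside a single stateful loop with inline append/strip; B is a three-pass pipeline: tag every line with a break flag, group the lines into list-of-line segments, then render each non-empty segment with join and strip.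
import Mathlib
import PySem

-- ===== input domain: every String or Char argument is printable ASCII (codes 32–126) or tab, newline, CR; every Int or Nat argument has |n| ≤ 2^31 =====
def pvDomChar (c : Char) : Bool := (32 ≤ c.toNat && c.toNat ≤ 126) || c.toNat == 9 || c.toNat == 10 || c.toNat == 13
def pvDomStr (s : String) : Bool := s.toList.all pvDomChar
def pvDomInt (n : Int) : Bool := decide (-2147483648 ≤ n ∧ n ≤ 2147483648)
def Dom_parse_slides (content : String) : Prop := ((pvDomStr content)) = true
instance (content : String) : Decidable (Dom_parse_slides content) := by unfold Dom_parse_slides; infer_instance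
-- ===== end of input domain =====

-- B replaces A's single-pass string accumulator by a three-pass pipeline (tag each line
-- with a break flag, group the lines into segments, render the non-empty segments);
-- objective: alternative decomposition, same cost.

-- ===== PORT A =====
-- one iteration of A's for-loop over the lines; state = (slides, current_slide, in_code_block, in_notes)
def pvAStep (st : List String × String × Bool × Bool) (line : String) :
    List String × String × Bool × Bool :=
  match st with
  | (slides, cur, ic, inn) =>
    if PySem.Str.strip line = "```python" then (slides, cur ++ line ++ "\n", true, inn)
    else if PySem.Str.strip line = "```" then (slides, cur ++ line ++ "\n", false, inn)
    else if PySem.Str.strip line = "::: {.notes}" then (slides, cur ++ line ++ "\n", ic, true)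
    else if PySem.Str.strip line = ":::" ∧ inn = true then (slides, cur ++ line ++ "\n", ic, false)
    else if PySem.Str.startswith line "# " && !ic && !inn then
      ((if cur ≠ "" then slides ++ [PySem.Str.strip cur] else slides), line ++ "\n", ic, inn)
    else (slides, cur ++ line ++ "\n", ic, inn)

def parse_slides (content : String) : List String :=
  let lines := (PySem.Str.split? content "\n").getD []  -- sep = "\n" ≠ "", so split? is never none
  match lines.foldl pvAStep ([], "", false, false) with
  | (slides, cur, _, _) => if cur ≠ "" then slides ++ [PySem.Str.strip cur] else slides

-- ===== PORT B =====
-- pass 1 of Source B: tag every line with whether it starts a new slide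
def pvMark (st : List (String × Bool) × Bool × Bool) (line : String) :
    List (String × Bool) × Bool × Bool :=
  match st with
  | (acc, ic, inn) =>
    if PySem.Str.strip line = "```python" then (acc ++ [(line, false)], true, inn)
    else if PySem.Str.strip line = "```" then (acc ++ [(line, false)], false, inn)
    else if PySem.Str.strip line = "::: {.notes}" then (acc ++ [(line, false)], ic, true)
    else if PySem.Str.strip line = ":::" ∧ inn = true then (acc ++ [(line, false)], ic, false)
    else (acc ++ [(line, PySem.Str.startswith line "# " && !ic && !inn)], ic, inn)

-- Source B's segments[-1].append(line)
def pvAppendLast (segs : List (List String)) (l : String) : List (List String) :=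
  match segs with
  | [] => []
  | [seg] => [seg ++ [l]]
  | s :: rest => s :: pvAppendLast rest l

-- pass 2 of Source B: cut the tagged lines into a new segment before each tagged line
def pvGroup (segs : List (List String)) (p : String × Bool) : List (List String) :=
  if p.2 then segs ++ [[p.1]] else pvAppendLast segs p.1

def parse_slides_alt (content : String) : List String :=
  let lines := (PySem.Str.split? content "\n").getD []  -- sep = "\n" ≠ "", so split? is never none
  let marked := (lines.foldl pvMark ([], false, false)).1
  let segments := marked.foldl pvGroup [[]]
  (segments.filter (· ≠ [])).map (fun seg => PySem.Str.strip (PySem.Str.join "\n" seg))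

-- ===== PRECONDITION & SPEC =====
def Spec_parse_slides (content : String) (out : List String) : Prop := out = parse_slides_alt content
instance (content : String) (out : List String) : Decidable (Spec_parse_slides content out) := by unfold Spec_parse_slides; infer_instance

-- ===== CLAIM (what is proved, stated in full; the proofs are below) =====
def Claim_equal_parse_slides : Prop := ∀ (content : String), Dom_parse_slides content → Spec_parse_slides content (parse_slides content)

-- ===== LEMMAS AND PROOFS =====

-- the segment structure (lists of consecutive lines) both programs cut the input into
def pvSegs (seg : List String) (ls : List String) (ic inn : Bool) : List (List String) :=
  match ls with
  | [] => [seg]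
  | l :: r =>
    if PySem.Str.strip l = "```python" then pvSegs (seg ++ [l]) r true inn
    else if PySem.Str.strip l = "```" then pvSegs (seg ++ [l]) r false inn
    else if PySem.Str.strip l = "::: {.notes}" then pvSegs (seg ++ [l]) r ic true
    else if PySem.Str.strip l = ":::" ∧ inn = true then pvSegs (seg ++ [l]) r ic false
    else if PySem.Str.startswith l "# " && !ic && !inn then seg :: pvSegs [l] r ic inn
    else pvSegs (seg ++ [l]) r ic inn

def pvRender (gs : List (List String)) : List String :=
  (gs.filter (· ≠ [])).map (fun seg => PySem.Str.strip (PySem.Str.join "\n" seg))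

def pvAFin (st : List String × String × Bool × Bool) : List String :=
  match st with
  | (slides, cur, _, _) => if cur ≠ "" then slides ++ [PySem.Str.strip cur] else slides

-- pass 1 of Source B written as a recursion (tagged lines, final flags)
def pvMarksF (ls : List String) (ic inn : Bool) : List (String × Bool) × Bool × Bool :=
  match ls with
  | [] => ([], ic, inn)
  | l :: r =>
    if PySem.Str.strip l = "```python" then
      ((l, false) :: (pvMarksF r true inn).1, (pvMarksF r true inn).2)
    else if PySem.Str.strip l = "```" then
      ((l, false) :: (pvMarksF r false inn).1, (pvMarksF r false inn).2)
    else if PySem.Str.strip l = "::: {.notes}" then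
      ((l, false) :: (pvMarksF r ic true).1, (pvMarksF r ic true).2)
    else if PySem.Str.strip l = ":::" ∧ inn = true then
      ((l, false) :: (pvMarksF r ic false).1, (pvMarksF r ic false).2)
    else
      ((l, PySem.Str.startswith l "# " && !ic && !inn) :: (pvMarksF r ic inn).1, (pvMarksF r ic inn).2)

theorem pvRender_cons (seg : List String) (gs : List (List String)) :
    pvRender (seg :: gs)
      = (if seg ≠ [] then [PySem.Str.strip (PySem.Str.join "\n" seg)] else []) ++ pvRender gs := by
  by_cases h : seg = [] <;> simp [pvRender, h]

theorem pv_rstrip_snoc (ys : List Char) :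
    PySem.Chars.rstrip (ys ++ ['\n']) = PySem.Chars.rstrip ys := by
  simp [PySem.Chars.rstrip, PySem.Chars.isspace]

theorem pv_strip_snoc_nl (cs : List Char) :
    PySem.Chars.strip (cs ++ ['\n']) = PySem.Chars.strip cs := by
  unfold PySem.Chars.strip PySem.Chars.lstrip
  rw [List.dropWhile_append]
  split
  · rename_i h
    simp only [List.isEmpty_iff] at h
    rw [h]
    simp [PySem.Chars.isspace, PySem.Chars.rstrip]
  · exact pv_rstrip_snoc _

theorem pv_joinNl_eq (gs : List (List Char)) (h : gs ≠ []) :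
    (gs.map (· ++ ['\n'])).flatten = PySem.Chars.join ['\n'] gs ++ ['\n'] := by
  induction gs with
  | nil => simp at h
  | cons a rest ih =>
    cases rest with
    | nil => simp [PySem.Chars.join_singleton]
    | cons b r =>
      simp only [List.map_cons, List.flatten_cons] at ih ⊢
      rw [PySem.Chars.join_cons_cons, ih (by simp)]
      simp

theorem pv_joinNl_nil (gs : List (List Char)) :
    (gs.map (· ++ ['\n'])).flatten = [] ↔ gs = [] := by
  cases gs <;> simp

theorem pv_cur_ne (seg : List String) (cur : String)
    (hcur : cur.toList = ((seg.map String.toList).map (· ++ ['\n'])).flatten) :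
    (cur ≠ "") ↔ seg ≠ [] := by
  rw [not_iff_not]
  constructor
  · intro h; subst h; simpa using (pv_joinNl_nil _).mp hcur.symm
  · intro h; subst h; simp at hcur
    exact String.toList_inj.mp (by simpa using hcur)

theorem pv_strip_cur (seg : List String) (cur : String)
    (hcur : cur.toList = ((seg.map String.toList).map (· ++ ['\n'])).flatten) (h : seg ≠ []) :
    PySem.Str.strip cur = PySem.Str.strip (PySem.Str.join "\n" seg) := by
  apply String.toList_inj.mp
  rw [PySem.Str.toList_strip, PySem.Str.toList_strip, PySem.Str.toList_join]
  rw [show ("\n" : String).toList = ['\n'] from rfl]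
  rw [hcur, pv_joinNl_eq _ (by simpa using h), pv_strip_snoc_nl]

set_option maxHeartbeats 1000000 in
theorem pv_A1 (ls : List String) : ∀ (slides : List String) (cur : String)
    (seg : List String) (ic inn : Bool),
    cur.toList = ((seg.map String.toList).map (· ++ ['\n'])).flatten →
    pvAFin (ls.foldl pvAStep (slides, cur, ic, inn)) = slides ++ pvRender (pvSegs seg ls ic inn) := by
  induction ls with
  | nil =>
    intro slides cur seg ic inn hcur
    simp only [List.foldl_nil, pvAFin, pvSegs, pvRender_cons]
    by_cases h : seg = []
    · subst h; simp at hcur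
      have hc : cur = "" := String.toList_inj.mp (by simpa using hcur)
      simp [hc, pvRender]
    · rw [if_pos ((pv_cur_ne seg cur hcur).mpr h), pv_strip_cur seg cur hcur h]
      simp [pvRender, h]
  | cons l r ih =>
    intro slides cur seg ic inn hcur
    rw [List.foldl_cons]
    have hsnoc : ∀ (x : String), (cur ++ x ++ "\n").toList
        = (((seg ++ [x]).map String.toList).map (· ++ ['\n'])).flatten := by
      intro x; simp [hcur]
    simp only [pvAStep, pvSegs]
    split_ifs with h1 h2 h3 h4 h5 hc
    · exact ih _ _ _ _ _ (hsnoc l)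
    · exact ih _ _ _ _ _ (hsnoc l)
    · exact ih _ _ _ _ _ (hsnoc l)
    · exact ih _ _ _ _ _ (hsnoc l)
    · rw [ih _ (l ++ "\n") [l] ic inn (by simp), pvRender_cons]
      have hseg := (pv_cur_ne seg cur hcur).mp hc
      rw [if_pos hseg, pv_strip_cur seg cur hcur hseg]
      simp
    · rw [ih _ (l ++ "\n") [l] ic inn (by simp), pvRender_cons]
      have hseg : seg = [] := by
        by_contra hs; exact hc ((pv_cur_ne seg cur hcur).mpr hs)
      simp [hseg]
    · exact ih _ _ _ _ _ (hsnoc l)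

theorem pv_mark_acc (ls : List String) : ∀ (acc : List (String × Bool)) (ic inn : Bool),
    ls.foldl pvMark (acc, ic, inn) = (acc ++ (pvMarksF ls ic inn).1, (pvMarksF ls ic inn).2) := by
  induction ls with
  | nil => intro acc ic inn; simp [pvMarksF]
  | cons l r ih =>
    intro acc ic inn
    rw [List.foldl_cons]
    simp only [pvMark, pvMarksF]
    split_ifs with h1 h2 h3 h4
    all_goals rw [ih]; simp

theorem pv_appendLast (init : List (List String)) (seg : List String) (l : String) :
    pvAppendLast (init ++ [seg]) l = init ++ [seg ++ [l]] := by
  induction init with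
  | nil => rfl
  | cons a t ih =>
    cases t with
    | nil => rfl
    | cons b u => simpa [pvAppendLast] using ih

theorem pv_B1 (ls : List String) : ∀ (ic inn : Bool) (init : List (List String)) (seg : List String),
    ((pvMarksF ls ic inn).1).foldl pvGroup (init ++ [seg]) = init ++ pvSegs seg ls ic inn := by
  induction ls with
  | nil => intro ic inn init seg; simp [pvMarksF, pvSegs]
  | cons l r ih =>
    intro ic inn init seg
    simp only [pvMarksF, pvSegs]
    split_ifs with h1 h2 h3 h4 h5
    · rw [List.foldl_cons, show pvGroup (init ++ [seg]) (l, false) = init ++ [seg ++ [l]] from by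
        simp [pvGroup, pv_appendLast], ih]
    · rw [List.foldl_cons, show pvGroup (init ++ [seg]) (l, false) = init ++ [seg ++ [l]] from by
        simp [pvGroup, pv_appendLast], ih]
    · rw [List.foldl_cons, show pvGroup (init ++ [seg]) (l, false) = init ++ [seg ++ [l]] from by
        simp [pvGroup, pv_appendLast], ih]
    · rw [List.foldl_cons, show pvGroup (init ++ [seg]) (l, false) = init ++ [seg ++ [l]] from by
        simp [pvGroup, pv_appendLast], ih]
    · simp only [List.foldl_cons, pvGroup]
      rw [if_pos h5, ih _ _ (init ++ [seg]) [l]]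
      simp
    · simp only [List.foldl_cons, pvGroup]
      rw [if_neg h5, pv_appendLast, ih]

-- ===== VERDICT (by name: the statement is the Claim_ definition above) =====
theorem parse_slides_spec : Claim_equal_parse_slides := by
  intro content _
  unfold Spec_parse_slides parse_slides parse_slides_alt
  have hA := pv_A1 ((PySem.Str.split? content "\n").getD []) [] "" [] false false (by simp)
  have hB : ((((PySem.Str.split? content "\n").getD []).foldl pvMark ([], false, false)).1).foldl
      pvGroup [[]] = pvSegs [] ((PySem.Str.split? content "\n").getD []) false false := by
    rw [pv_mark_acc]
    simpa using pv_B1 ((PySem.Str.split? content "\n").getD []) false false [] []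
  simp only [List.nil_append] at hA
  rw [show pvAFin (((PySem.Str.split? content "\n").getD []).foldl pvAStep ([], "", false, false))
        = (match ((PySem.Str.split? content "\n").getD []).foldl pvAStep ([], "", false, false) with
           | (slides, cur, _, _) => if cur ≠ "" then slides ++ [PySem.Str.strip cur] else slides) from rfl] at hA
  rw [hA, ← hB]
  rfl
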